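-- pv_equiv track=rewrite | github.com/pazzobarbone/advent-of-code-2021 | day-04/day-04.py | get_board_combinations_and_associated_board_ids
-- ===== SOURCE A (Python) =====
-- def get_board_combinations_and_associated_board_ids(lines):
--     combinations = list()
--     board_ids = list()
--     current_board_combinations = list()
--     current_board_id = 0
--     if lines[-1] != "\n":
--         lines.append("\n")
--     for line in lines:
--         line = line.strip()
--         if not line:
--             if current_board_combinations:
--                 for c in range(len(current_board_combinations[0])):
--                     combinations.append(
--                         [current_board_combinations[r][c] for r in range(len(current_board_combinations))]
--                     )
--                     board_ids.append(current_board_id)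
--                 current_board_combinations = []
--                 current_board_id += 1
--         else:
--             combinations.append([int(i) for i in line.split()])
--             current_board_combinations.append([int(i) for i in line.split()])
--             board_ids.append(current_board_id)
--     return combinations, board_ids
-- ===== SOURCE B (Python) =====
-- def get_board_combinations_and_associated_board_ids(lines):
--     # Two-phase: first group the lines into board blocks, then emit rows and
--     # columns per block.  (A mutates `lines` in place by appending "\n"; B does
--     # not — the equivalence is about the return value.)
--     blocks = []
--     current = []
--     for line in lines:
--         stripped = line.strip()
--         if stripped:
--             current.append([int(t) for t in stripped.split()])
--         elif current:
--             blocks.append(current)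
--             current = []
--     if current:
--         blocks.append(current)
--     combinations = []
--     board_ids = []
--     for board_id, board in enumerate(blocks):
--         for row in board:
--             combinations.append(row)
--             board_ids.append(board_id)
--         for c in range(len(board[0])):
--             combinations.append([board[r][c] for r in range(len(board))])
--             board_ids.append(board_id)
--     return combinations, board_ids
-- ===== Notes on version B (the rewrite author's own statement) =====
-- stated objective: alternative
-- what changed: A is a single streaming loop that interleaves output emission with mutable current-board state and an in-place append of a trailing newline to `lines`; B first groups the lines into board blocks (a separate grouping pass, no mutation of `lines`, trailing block flushed explicitly), then emits each block's rows and its transposed columns with the board id taken from enumerate.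
import Mathlib
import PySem

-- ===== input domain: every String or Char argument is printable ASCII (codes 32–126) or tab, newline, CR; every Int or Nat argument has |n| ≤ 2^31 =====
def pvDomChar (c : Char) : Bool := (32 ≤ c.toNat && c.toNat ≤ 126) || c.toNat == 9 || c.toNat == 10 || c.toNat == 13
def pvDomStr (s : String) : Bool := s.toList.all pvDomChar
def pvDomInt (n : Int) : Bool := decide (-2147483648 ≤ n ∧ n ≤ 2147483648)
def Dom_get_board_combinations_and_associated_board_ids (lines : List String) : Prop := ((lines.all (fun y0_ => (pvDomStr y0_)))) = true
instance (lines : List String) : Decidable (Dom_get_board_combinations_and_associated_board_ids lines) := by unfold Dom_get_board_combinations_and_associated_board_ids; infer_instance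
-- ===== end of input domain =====

-- B restructures A's single streaming loop into a group-into-blocks pass followed by a
-- per-block emission pass (objective: alternative decomposition, same cost).
-- A mutates `lines` in place (appends "\n" when the last line is not "\n"); B does not —
-- the equivalence proved here is about the return value only.

-- ===== PORT A =====
-- [int(i) for i in t.split()]  (both Pythons parse tokens of the stripped line this way)
def pvRow (t : String) : List Int :=
  (PySem.Str.split₀ t).map (fun i => (PySem.Int.ofStr? i).getD 0)

-- the column loop: for c in range(len(cur[0])): [cur[r][c] for r in range(len(cur))]
-- (identical comprehension in both Pythons)
def pvCols (cur : List (List Int)) : List (List Int) :=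
  (List.range (cur.headD []).length).map
    (fun c => (List.range cur.length).map (fun r => (cur.getD r []).getD c 0))

structure PvStA where
  combos : List (List Int)
  ids : List Int
  cur : List (List Int)
  bid : Int
deriving Repr, DecidableEq

def pvStepA (st : PvStA) (line : String) : PvStA :=
  let t := PySem.Str.strip line
  if t = "" then
    if st.cur ≠ [] then
      { combos := st.combos ++ pvCols st.cur,
        ids := st.ids ++ List.replicate (st.cur.headD []).length st.bid,
        cur := [], bid := st.bid + 1 }
    else st
  else
    { combos := st.combos ++ [pvRow t], ids := st.ids ++ [st.bid],
      cur := st.cur ++ [pvRow t], bid := st.bid }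

def get_board_combinations_and_associated_board_ids (lines : List String) : List (List Int) × List Int :=
  let lines' := if PySem.List.pyGet? lines (-1) = some "\n" then lines else lines ++ ["\n"]
  let st := lines'.foldl pvStepA ⟨[], [], [], 0⟩
  (st.combos, st.ids)

-- ===== PORT B =====
def pvGroupStep (st : List (List (List Int)) × List (List Int)) (line : String) :
    List (List (List Int)) × List (List Int) :=
  let t := PySem.Str.strip line
  if t ≠ "" then (st.1, st.2 ++ [pvRow t])
  else if st.2 ≠ [] then (st.1 ++ [st.2], [])
  else st

def pvFlush (g : List (List (List Int)) × List (List Int)) : List (List (List Int)) :=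
  if g.2 ≠ [] then g.1 ++ [g.2] else g.1

def pvBlocksOf (lines : List String) : List (List (List Int)) :=
  pvFlush (lines.foldl pvGroupStep ([], []))

def pvEmit (acc : List (List Int) × List Int) (p : Int × List (List Int)) :
    List (List Int) × List Int :=
  (acc.1 ++ p.2 ++ pvCols p.2,
   acc.2 ++ List.replicate p.2.length p.1 ++ List.replicate (p.2.headD []).length p.1)

def get_board_combinations_and_associated_board_ids_alt (lines : List String) : List (List Int) × List Int :=
  (PySem.List.enumerate (pvBlocksOf lines) 0).foldl pvEmit ([], [])

-- ===== PRECONDITION & SPEC =====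
-- Pre_ excludes exactly the inputs on which the Python A raises: the empty list
-- (IndexError on lines[-1]), a non-blank line with a token int() rejects (ValueError),
-- and a board block in which some row is shorter than the block's first row
-- (IndexError in the column comprehension).
def Pre_get_board_combinations_and_associated_board_ids (lines : List String) : Prop :=
  lines ≠ [] ∧
  (∀ s ∈ lines, ∀ t ∈ PySem.Str.split₀ (PySem.Str.strip s), (PySem.Int.ofStr? t).isSome) ∧
  (∀ g ∈ ((lines.map (fun s =>
        if PySem.Str.strip s = "" then none
        else some (PySem.Str.split₀ (PySem.Str.strip s)).length)).splitOnP
          (· = none)).map (List.filterMap id),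
     ∀ n ∈ g, g.headD 0 ≤ n)
instance (lines : List String) : Decidable (Pre_get_board_combinations_and_associated_board_ids lines) := by unfold Pre_get_board_combinations_and_associated_board_ids; infer_instance

def pvWitness_get_board_combinations_and_associated_board_ids : List String :=
  ["1 2\n", "3 4\n", "\n", "5 6\n", "7 8\n"]

def Spec_get_board_combinations_and_associated_board_ids (lines : List String) (out : List (List Int) × List Int) : Prop := out = get_board_combinations_and_associated_board_ids_alt lines
instance (lines : List String) (out : List (List Int) × List Int) : Decidable (Spec_get_board_combinations_and_associated_board_ids lines out) := by unfold Spec_get_board_combinations_and_associated_board_ids; infer_instance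

-- ===== CLAIM (what is proved, stated in full; the proofs are below) =====
def Claim_equal_get_board_combinations_and_associated_board_ids : Prop := ∀ (lines : List String), Dom_get_board_combinations_and_associated_board_ids lines → Pre_get_board_combinations_and_associated_board_ids lines → Spec_get_board_combinations_and_associated_board_ids lines (get_board_combinations_and_associated_board_ids lines)

-- ===== LEMMAS AND PROOFS =====

-- A's streaming loop, without the final flush (A gets the flush from the padded "\n")
def pvER : List String → List (List Int) → Int → List (List Int) × List Int
  | [], _, _ => ([], [])
  | l :: ls, cur, bid =>
    let t := PySem.Str.strip l
    if t = "" then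
      if cur ≠ [] then
        let rest := pvER ls [] (bid + 1)
        (pvCols cur ++ rest.1, List.replicate (cur.headD []).length bid ++ rest.2)
      else pvER ls cur bid
    else
      let rest := pvER ls (cur ++ [pvRow t]) bid
      (pvRow t :: rest.1, bid :: rest.2)

-- same, but flushing the pending board at the end of input
def pvEF : List String → List (List Int) → Int → List (List Int) × List Int
  | [], cur, bid =>
    if cur ≠ [] then (pvCols cur, List.replicate (cur.headD []).length bid) else ([], [])
  | l :: ls, cur, bid =>
    let t := PySem.Str.strip l
    if t = "" then
      if cur ≠ [] then
        let rest := pvEF ls [] (bid + 1)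
        (pvCols cur ++ rest.1, List.replicate (cur.headD []).length bid ++ rest.2)
      else pvEF ls cur bid
    else
      let rest := pvEF ls (cur ++ [pvRow t]) bid
      (pvRow t :: rest.1, bid :: rest.2)

-- B's grouping, recursively
def pvBR : List String → List (List Int) → List (List (List Int))
  | [], cur => if cur ≠ [] then [cur] else []
  | l :: ls, cur =>
    let t := PySem.Str.strip l
    if t = "" then
      if cur ≠ [] then cur :: pvBR ls [] else pvBR ls cur
    else pvBR ls (cur ++ [pvRow t])

-- B's emission, recursively
def pvEB : List (List (List Int)) → Int → List (List Int) × List Int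
  | [], _ => ([], [])
  | b :: bs, bid =>
    let rest := pvEB bs (bid + 1)
    (b ++ pvCols b ++ rest.1,
     List.replicate b.length bid ++ List.replicate (b.headD []).length bid ++ rest.2)

theorem pvRunA (L : List String) : ∀ C I cur bid,
    (L.foldl pvStepA ⟨C, I, cur, bid⟩).combos = C ++ (pvER L cur bid).1 ∧
    (L.foldl pvStepA ⟨C, I, cur, bid⟩).ids = I ++ (pvER L cur bid).2 := by
  induction L with
  | nil => intro C I cur bid; simp [pvER]
  | cons l ls ih =>
    intro C I cur bid
    simp only [List.foldl_cons, pvStepA, pvER]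
    split_ifs with h1 h2 <;> simp [ih, List.append_assoc]

theorem pvER_pad (L : List String) : ∀ cur bid, pvER (L ++ ["\n"]) cur bid = pvEF L cur bid := by
  induction L with
  | nil =>
    intro cur bid
    have hs : PySem.Str.strip "\n" = "" := by decide
    by_cases hc : cur = [] <;> simp [pvER, pvEF, hs, hc]
  | cons l ls ih =>
    intro cur bid
    simp only [List.cons_append, pvER, pvEF]
    split_ifs <;> simp [ih]

theorem pvER_cons (l : String) (ls : List String) (cur : List (List Int)) (bid : Int) :
    pvER (l :: ls) cur bid =
      (if PySem.Str.strip l = "" then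
        (if cur ≠ [] then
          (pvCols cur ++ (pvER ls [] (bid + 1)).1,
           List.replicate (cur.headD []).length bid ++ (pvER ls [] (bid + 1)).2)
        else pvER ls cur bid)
      else
        (pvRow (PySem.Str.strip l) :: (pvER ls (cur ++ [pvRow (PySem.Str.strip l)]) bid).1,
         bid :: (pvER ls (cur ++ [pvRow (PySem.Str.strip l)]) bid).2)) := rfl

theorem pvEF_cons (l : String) (ls : List String) (cur : List (List Int)) (bid : Int) :
    pvEF (l :: ls) cur bid =
      (if PySem.Str.strip l = "" then
        (if cur ≠ [] then
          (pvCols cur ++ (pvEF ls [] (bid + 1)).1,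
           List.replicate (cur.headD []).length bid ++ (pvEF ls [] (bid + 1)).2)
        else pvEF ls cur bid)
      else
        (pvRow (PySem.Str.strip l) :: (pvEF ls (cur ++ [pvRow (PySem.Str.strip l)]) bid).1,
         bid :: (pvEF ls (cur ++ [pvRow (PySem.Str.strip l)]) bid).2)) := rfl

theorem pvER_last_nl (L : List String) : ∀ cur bid, L.getLast? = some "\n" →
    pvER L cur bid = pvEF L cur bid := by
  induction L with
  | nil => intro _ _ h; simp at h
  | cons l ls ih =>
    intro cur bid h
    cases ls with
    | nil =>
      simp at h
      subst h
      have hs : PySem.Str.strip "\n" = "" := by decide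
      by_cases hc : cur = [] <;> simp [pvER, pvEF, hs, hc]
    | cons l2 ls2 =>
      have h' : (l2 :: ls2).getLast? = some "\n" := by
        simpa [List.getLast?_cons_cons] using h
      rw [pvER_cons, pvEF_cons]
      split_ifs
      · simp [ih _ _ h']
      · exact ih _ _ h'
      · simp [ih _ _ h']

theorem pvGroup_run (L : List String) : ∀ blocks cur,
    pvFlush (L.foldl pvGroupStep (blocks, cur)) = blocks ++ pvBR L cur := by
  induction L with
  | nil =>
    intro blocks cur
    by_cases hc : cur = [] <;> simp [pvFlush, pvBR, hc]
  | cons l ls ih =>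
    intro blocks cur
    simp only [List.foldl_cons, pvGroupStep]
    split_ifs with h1 h2
    · rw [ih]; simp [pvBR, h1]
    · rw [ih]; simp [pvBR, h1, h2, List.append_assoc]
    · rw [ih]; simp only [pvBR]; simp [h1, h2]

theorem pvEmit_run (bs : List (List (List Int))) : ∀ (bid : Int) C I,
    (PySem.List.enumerate bs bid).foldl pvEmit (C, I) =
      (C ++ (pvEB bs bid).1, I ++ (pvEB bs bid).2) := by
  induction bs with
  | nil => intro bid C I; simp [PySem.List.enumerate_nil, pvEB]
  | cons b bs ih =>
    intro bid C I
    rw [PySem.List.enumerate_cons]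
    simp only [List.foldl_cons, pvEmit, pvEB]
    simp [ih, List.append_assoc]

theorem pvEF_blocks (L : List String) : ∀ cur bid,
    (cur ++ (pvEF L cur bid).1,
     List.replicate cur.length bid ++ (pvEF L cur bid).2) = pvEB (pvBR L cur) bid := by
  induction L with
  | nil =>
    intro cur bid
    by_cases hc : cur = [] <;> simp [pvEF, pvBR, pvEB, hc]
  | cons l ls ih =>
    intro cur bid
    simp only [pvEF, pvBR]
    split_ifs with h1 h2
    · simp only [pvEB]
      have h0 := ih [] (bid + 1)
      simp only [List.nil_append, List.length_nil, List.replicate_zero] at h0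
      rw [← h0]
      simp [List.append_assoc, -List.replicate_append_replicate]
    · exact ih cur bid
    · have h0 := ih (cur ++ [pvRow (PySem.Str.strip l)]) bid
      rw [← h0]
      simp [List.append_assoc, List.replicate_succ']

-- ===== VERDICT (by name: the statement is the Claim_ definition above) =====
theorem get_board_combinations_and_associated_board_ids_spec : Claim_equal_get_board_combinations_and_associated_board_ids := by
  intro lines _ _
  unfold Spec_get_board_combinations_and_associated_board_ids
  unfold get_board_combinations_and_associated_board_ids get_board_combinations_and_associated_board_ids_alt
  have hB : pvBlocksOf lines = pvBR lines [] := by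
    have h := pvGroup_run lines [] []
    simpa [pvBlocksOf] using h
  have hEF : pvEF lines [] 0 = pvEB (pvBR lines []) 0 := by
    have h := pvEF_blocks lines [] 0
    simpa using h
  rw [hB, pvEmit_run]
  by_cases h : PySem.List.pyGet? lines (-1) = some "\n"
  · simp only [if_pos h]
    have h1 := pvRunA lines [] [] [] 0
    have h2 := pvER_last_nl lines [] 0 (by simpa [PySem.List.pyGet?_neg_one] using h)
    simp only [List.nil_append] at h1 ⊢
    rw [Prod.ext_iff]
    exact ⟨by rw [h1.1, h2, hEF], by rw [h1.2, h2, hEF]⟩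
  · simp only [if_neg h]
    have h1 := pvRunA (lines ++ ["\n"]) [] [] [] 0
    have h2 := pvER_pad lines [] 0
    simp only [List.nil_append] at h1 ⊢
    rw [Prod.ext_iff]
    exact ⟨by rw [h1.1, h2, hEF], by rw [h1.2, h2, hEF]⟩
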